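-- pv_equiv track=rewrite | github.com/Nghia03092004/nghia03092004.github.io | project_euler/problem_284/solution.py | mul_low
-- ===== SOURCE A (Python) =====
-- BASE = 14
--
-- def mul_low(a, b, keep):
--     """Multiply a * b in base 14, keep only first 'keep' digits."""
--     res = [0] * keep
--     na, nb = len(a), len(b)
--     for i in range(min(na, keep)):
--         if a[i] == 0:
--             continue
--         carry = 0
--         jmax = min(nb, keep - i)
--         for j in range(jmax):
--             carry += res[i + j] + a[i] * b[j]
--             res[i + j] = carry % BASE
--             carry //= BASE
--         j2 = jmax
--         while i + j2 < keep and carry > 0: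
--             carry += res[i + j2]
--             res[i + j2] = carry % BASE
--             carry //= BASE
--             j2 += 1
--     return res
-- ===== SOURCE B (Python) =====
-- BASE = 14
--
-- def _toint(ds):
--     n = len(ds)
--     if n <= 32:
--         v = 0
--         for d in reversed(ds):
--             v = v * BASE + d
--         return v
--     m = n // 2
--     return _toint(ds[:m]) + BASE ** m * _toint(ds[m:])
--
-- def _digits(p, n):
--     if n <= 32:
--         out = []
--         for _ in range(n):
--             out.append(p % BASE)
--             p //= BASE
--         return out
--     m = n // 2
--     hi, lo = divmod(p, BASE ** m)
--     return _digits(lo, m) + _digits(hi, n - m)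
--
-- def mul_low(a, b, keep):
--     if keep <= 0:
--         return []
--     p = _toint(a) * _toint(b) % BASE ** keep
--     return _digits(p, keep)
-- ===== Notes on version B (the rewrite author's own statement) =====
-- stated objective: faster
-- what changed: Replaces the hand-written digit-by-digit schoolbook multiplication (nested Python loops with explicit carry propagation) by divide-and-conquer conversion of both operands to Python big integers, one big-int multiply reduced mod BASE**keep, and divide-and-conquer re-extraction of the low 'keep' base-14 digits.
-- intended difference: On inputs with keep > len(b) where some a[i] with i + len(b) < keep has a[i]*value(b) < 0 (only possible for non-digit, negative entries), A silently drops a negative carry at the end of the row (its while-loop only propagates positive carries) and returns a miscomputed digit list, while B returns the true low digits of the product modulo 14**keep, which is the intended value. — e.g. on mul_low([-1], [1], 2): A returns [13, 0], B returns [13, 13]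
import Mathlib
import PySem

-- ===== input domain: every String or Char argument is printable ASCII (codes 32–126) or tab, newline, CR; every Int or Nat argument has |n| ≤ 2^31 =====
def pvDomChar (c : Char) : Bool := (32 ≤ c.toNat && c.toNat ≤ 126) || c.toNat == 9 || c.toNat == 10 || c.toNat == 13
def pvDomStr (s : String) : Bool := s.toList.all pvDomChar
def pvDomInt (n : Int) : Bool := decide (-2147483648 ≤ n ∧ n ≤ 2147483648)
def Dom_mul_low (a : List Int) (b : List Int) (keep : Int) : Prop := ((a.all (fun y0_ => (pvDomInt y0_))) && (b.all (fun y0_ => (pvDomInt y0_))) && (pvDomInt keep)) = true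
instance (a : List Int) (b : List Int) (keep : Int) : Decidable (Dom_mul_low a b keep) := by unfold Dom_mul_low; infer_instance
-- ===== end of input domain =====

-- B replaces A's hand-written digit-by-digit schoolbook multiplication by divide-and-conquer
-- conversion to big integers, one big-int multiply reduced mod 14^keep, and divide-and-conquer
-- re-extraction of the low 'keep' base-14 digits (objective: faster).

-- ===== PORT A =====
-- the trailing 'while i + j2 < keep and carry > 0' loop: it runs at most keep-(i+jmax) times,
-- so fuel = keep-(i+jmax) is exact (the position test i+j2<keep is fuel>0; order of the two
-- tests is irrelevant here since neither has side effects)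
def pvWhile : Nat → List Int → Int → Nat → List Int
  | 0, res, _, _ => res
  | f + 1, res, carry, pos =>
    if 0 < carry then
      let c := carry + res.getD pos 0
      pvWhile f (res.set pos (PySem.Int.mod c 14)) (PySem.Int.floordiv c 14) (pos + 1)
    else res

-- the inner 'for j in range(jmax)' loop; res[i+j] and b[j] are provably in range
-- (jmax = min(len b, keep-i)), so getD is exact for Python's indexing here
def pvRow (res : List Int) (ai : Int) (b : List Int) (i jmax : Nat) : List Int × Int :=
  (List.range jmax).foldl (fun st j =>
    let c := st.2 + st.1.getD (i + j) 0 + ai * b.getD j 0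
    (st.1.set (i + j) (PySem.Int.mod c 14), PySem.Int.floordiv c 14)) (res, 0)

def mul_low (a : List Int) (b : List Int) (keep : Int) : List Int :=
  let K := keep.toNat          -- len([0]*keep); empty for keep ≤ 0, like Python
  (List.range (min a.length K)).foldl (fun res i =>
    let ai := a.getD i 0       -- i < len a, in range
    if ai = 0 then res
    else
      let jmax := min b.length (K - i)
      let st := pvRow res ai b i jmax
      pvWhile (K - (i + jmax)) st.1 st.2 (i + jmax)) (List.replicate K 0)

-- ===== PORT B =====
def pvToInt (ds : List Int) : Int :=
  if ds.length ≤ 32 then ds.reverse.foldl (fun v d => v * 14 + d) 0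
  else
    pvToInt (ds.take (ds.length / 2)) + 14 ^ (ds.length / 2) * pvToInt (ds.drop (ds.length / 2))
termination_by ds.length
decreasing_by
  · simp only [List.length_take]; omega
  · simp only [List.length_drop]; omega

def pvDigits (p : Int) (n : Nat) : List Int :=
  if n ≤ 32 then
    ((List.range n).foldl (fun (st : List Int × Int) _ =>
      (st.1 ++ [PySem.Int.mod st.2 14], PySem.Int.floordiv st.2 14)) ([], p)).1
  else
    pvDigits (PySem.Int.mod p (14 ^ (n / 2))) (n / 2) ++
      pvDigits (PySem.Int.floordiv p (14 ^ (n / 2))) (n - n / 2)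
termination_by n
decreasing_by
  · omega
  · omega

def mul_low_alt (a : List Int) (b : List Int) (keep : Int) : List Int :=
  if keep ≤ 0 then []
  else pvDigits (PySem.Int.mod (pvToInt a * pvToInt b) (14 ^ keep.toNat)) keep.toNat

-- ===== PRECONDITION & SPEC =====
-- the base-14 value of a digit list (little-endian), used only to STATE the change region
def val14 : List Int → Int
  | [] => 0
  | d :: t => d + 14 * val14 t

-- On inputs with keep > len(b) where some a[i] with i + len(b) < keep has a[i]*value(b) < 0
-- (only possible for non-digit, negative entries), A silently drops a negative carry (its
-- while-loop only propagates positive carries) and returns a miscomputed digit list, while B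
-- returns the true low digits of the product modulo 14^keep, which is the intended value.
def D_mul_low (a : List Int) (b : List Int) (keep : Int) : Prop :=
  ∃ i < min a.length (keep - (b.length : Int)).toNat, a.getD i 0 * val14 b < 0
instance (a : List Int) (b : List Int) (keep : Int) : Decidable (D_mul_low a b keep) := by
  unfold D_mul_low; infer_instance

def Spec_mul_low (a : List Int) (b : List Int) (keep : Int) (out : List Int) : Prop :=
  ¬ D_mul_low a b keep → out = mul_low_alt a b keep
instance (a : List Int) (b : List Int) (keep : Int) (out : List Int) :
    Decidable (Spec_mul_low a b keep out) := by unfold Spec_mul_low; infer_instance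

def pvDiffWitness_mul_low : List Int × List Int × Int := ([-1], [1], 2)
def pvDiffWitnessOut_mul_low : (List Int) × (List Int) := ([13, 0], [13, 13])

-- ===== CLAIM (what is proved, stated in full; the proofs are below) =====
def Claim_unchanged_mul_low : Prop := ∀ (a : List Int) (b : List Int) (keep : Int), Dom_mul_low a b keep → Spec_mul_low a b keep (mul_low a b keep)
def Claim_changed_mul_low : Prop := Dom_mul_low (pvDiffWitness_mul_low.1) (pvDiffWitness_mul_low.2.1) (pvDiffWitness_mul_low.2.2) ∧ D_mul_low (pvDiffWitness_mul_low.1) (pvDiffWitness_mul_low.2.1) (pvDiffWitness_mul_low.2.2) ∧ mul_low (pvDiffWitness_mul_low.1) (pvDiffWitness_mul_low.2.1) (pvDiffWitness_mul_low.2.2) = pvDiffWitnessOut_mul_low.1 ∧ mul_low_alt (pvDiffWitness_mul_low.1) (pvDiffWitness_mul_low.2.1) (pvDiffWitness_mul_low.2.2) = pvDiffWitnessOut_mul_low.2 ∧ pvDiffWitnessOut_mul_low.1 ≠ pvDiffWitnessOut_mul_low.2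

-- ===== LEMMAS AND PROOFS =====

-- all entries are base-14 digits
def pvNormal (l : List Int) : Prop := ∀ x ∈ l, 0 ≤ x ∧ x < 14

-- the canonical low-n digit expansion that B computes
def digitsOf : Int → Nat → List Int
  | _, 0 => []
  | p, n + 1 => p % 14 :: digitsOf (p / 14) n

theorem val14_nonneg (l : List Int) (h : pvNormal l) : 0 ≤ val14 l := by
  induction l with
  | nil => simp [val14]
  | cons d t ih =>
    have hd := h d (List.mem_cons_self ..)
    have ht := ih (fun x hx => h x (List.mem_cons_of_mem _ hx))
    simp only [val14]; nlinarith

theorem val14_lt (l : List Int) (h : pvNormal l) : val14 l < 14 ^ l.length := by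
  induction l with
  | nil => simp [val14]
  | cons d t ih =>
    have hd := h d (List.mem_cons_self ..)
    have ht := ih (fun x hx => h x (List.mem_cons_of_mem _ hx))
    simp only [val14, List.length_cons, pow_succ]; nlinarith

theorem val14_set (l : List Int) (i : Nat) (x : Int) (hi : i < l.length) :
    val14 (l.set i x) = val14 l + (x - l.getD i 0) * 14 ^ i := by
  induction l generalizing i with
  | nil => simp at hi
  | cons d t ih =>
    cases i with
    | zero => simp [val14]; ring
    | succ i =>
      simp only [List.set_cons_succ, val14, List.getD_cons_succ]
      rw [ih i (by simpa using hi)]; ring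

theorem val14_take_drop (l : List Int) (p : Nat) :
    val14 l = val14 (l.take p) + 14 ^ p * val14 (l.drop p) := by
  induction l generalizing p with
  | nil => simp [val14]
  | cons d t ih =>
    cases p with
    | zero => simp [val14]
    | succ p =>
      simp only [List.take_succ_cons, List.drop_succ_cons, val14, ih p, pow_succ]
      ring

theorem val14_take_succ (l : List Int) (j : Nat) (hj : j < l.length) :
    val14 (l.take (j + 1)) = val14 (l.take j) + l.getD j 0 * 14 ^ j := by
  induction l generalizing j with
  | nil => simp at hj
  | cons d t ih =>
    cases j with
    | zero => simp [val14]
    | succ j =>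
      simp only [List.take_succ_cons, val14, List.getD_cons_succ,
        ih j (by simpa using hj), pow_succ]
      ring

theorem normal_set (l : List Int) (i : Nat) (x : Int) (h : pvNormal l)
    (hx : 0 ≤ x ∧ x < 14) : pvNormal (l.set i x) := by
  intro y hy
  rcases List.mem_or_eq_of_mem_set hy with h' | rfl
  · exact h y h'
  · exact hx

theorem normal_getD (l : List Int) (i : Nat) (h : pvNormal l) :
    0 ≤ l.getD i 0 ∧ l.getD i 0 < 14 := by
  by_cases hi : i < l.length
  · rw [List.getD_eq_getElem l 0 hi]
    exact h _ (List.getElem_mem hi)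
  · simp [List.getD_eq_getElem?_getD, List.getElem?_eq_none (by omega : l.length ≤ i)]

theorem emod_succ_split (p : Int) (m : Nat) : 14 * ((p / 14) % 14 ^ m) + p % 14 = p % 14 ^ (m + 1) := by
  have h1 : 14 * (p / 14) + p % 14 = p := Int.mul_ediv_add_emod p 14
  have h2 : (14:Int) ^ m * (p / 14 / 14 ^ m) + (p / 14) % 14 ^ m = p / 14 := Int.mul_ediv_add_emod _ _
  have hR1 : 0 ≤ (p / 14) % 14 ^ m := Int.emod_nonneg _ (by positivity)
  have hR2 : (p / 14) % 14 ^ m < 14 ^ m := Int.emod_lt_of_pos _ (by positivity)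
  have hr1 : 0 ≤ p % 14 := Int.emod_nonneg _ (by norm_num)
  have hr2 : p % 14 < 14 := Int.emod_lt_of_pos _ (by norm_num)
  have key : p = (14 * ((p / 14) % 14 ^ m) + p % 14) + 14 ^ (m+1) * (p / 14 / 14 ^ m) := by
    rw [pow_succ]; nlinarith [h1, h2]
  symm
  calc p % 14 ^ (m+1)
      = ((14 * ((p / 14) % 14 ^ m) + p % 14) + 14 ^ (m+1) * (p / 14 / 14 ^ m)) % 14 ^ (m+1) := by
        exact congrArg (· % 14 ^ (m+1)) key
    _ = (14 * ((p / 14) % 14 ^ m) + p % 14) % 14 ^ (m+1) := Int.add_mul_emod_self_left ..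
    _ = 14 * ((p / 14) % 14 ^ m) + p % 14 := Int.emod_eq_of_lt (by positivity) (by rw [pow_succ]; nlinarith)

theorem digits_unique (l : List Int) (n : Nat) (p : Int) (h : pvNormal l)
    (hlen : l.length = n) (hv : val14 l = p % 14 ^ n) : l = digitsOf p n := by
  induction l generalizing p n with
  | nil => subst hlen; rfl
  | cons d t ih =>
    subst hlen
    have hd := h d (List.mem_cons_self ..)
    have ht : pvNormal t := fun x hx => h x (List.mem_cons_of_mem _ hx)
    simp only [List.length_cons] at hv ⊢
    rw [← emod_succ_split p t.length] at hv
    simp only [val14] at hv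
    have hr1 : 0 ≤ p % 14 := Int.emod_nonneg _ (by norm_num)
    have hr2 : p % 14 < 14 := Int.emod_lt_of_pos _ (by norm_num)
    have hdr : d = p % 14 := by omega
    have hvt : val14 t = (p / 14) % 14 ^ t.length := by omega
    simp only [digitsOf]
    rw [← hdr]
    exact congrArg (fun x => d :: x) (ih t.length (p / 14) ht rfl hvt)

theorem horner_rev (l : List Int) :
    l.reverse.foldl (fun v d => v * 14 + d) 0 = val14 l := by
  induction l with
  | nil => rfl
  | cons d t ih =>
    simp only [List.reverse_cons, List.foldl_append, List.foldl_cons, List.foldl_nil, ih, val14]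
    ring

theorem foldl_digits {α : Type} (l : List α) (acc : List Int) (p : Int) :
    (l.foldl (fun (st : List Int × Int) _ =>
      (st.1 ++ [PySem.Int.mod st.2 14], PySem.Int.floordiv st.2 14)) (acc, p)).1
    = acc ++ digitsOf p l.length := by
  induction l generalizing acc p with
  | nil => simp [digitsOf]
  | cons x t ih =>
    rw [List.foldl_cons, ih]
    simp only [List.length_cons, digitsOf,
      PySem.Int.mod_eq_emod_of_pos (by norm_num : (0:Int) < 14),
      PySem.Int.floordiv_eq_ediv_of_pos (by norm_num : (0:Int) < 14),
      List.append_assoc, List.singleton_append]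

theorem pvToInt_eq (ds : List Int) : pvToInt ds = val14 ds := by
  fun_induction pvToInt with
  | case1 ds h => exact horner_rev ds
  | case2 ds h ih1 ih2 =>
    rw [ih1, ih2, ← val14_take_drop]

theorem emod_pow_succ_ediv (p : Int) (m : Nat) :
    (p % 14 ^ (m + 1)) / 14 = (p / 14) % 14 ^ m := by
  have h := emod_succ_split p m
  have hr1 : 0 ≤ p % 14 := Int.emod_nonneg _ (by norm_num)
  have hr2 : p % 14 < 14 := Int.emod_lt_of_pos _ (by norm_num)
  rw [← h, add_comm, Int.add_mul_ediv_left _ _ (by norm_num : (14:Int) ≠ 0),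
    Int.ediv_eq_zero_of_lt hr1 hr2, zero_add]

theorem ediv_pow_succ (p : Int) (m : Nat) : p / 14 ^ (m + 1) = (p / 14) / 14 ^ m := by
  rw [pow_succ']
  exact (Int.ediv_ediv_of_nonneg (by norm_num)).symm

theorem digitsOf_split (m : Nat) : ∀ (n : Nat) (p : Int), m ≤ n →
    digitsOf p n = digitsOf (p % 14 ^ m) m ++ digitsOf (p / 14 ^ m) (n - m) := by
  induction m with
  | zero => intro n p _; simp [digitsOf]
  | succ m ih =>
    intro n p h
    obtain ⟨n', rfl⟩ : ∃ n', n = n' + 1 := ⟨n - 1, by omega⟩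
    simp only [digitsOf]
    rw [Int.emod_emod_of_dvd _ (dvd_pow_self 14 (Nat.succ_ne_zero m)),
      emod_pow_succ_ediv, ediv_pow_succ, ih n' (p / 14) (by omega)]
    simp only [Nat.succ_sub_succ, List.cons_append]

theorem pvDigits_eq (p : Int) (n : Nat) : pvDigits p n = digitsOf p n := by
  fun_induction pvDigits with
  | case1 p n h =>
    rw [foldl_digits]
    simp [List.length_range]
  | case2 p n h ih1 ih2 =>
    rw [ih1, ih2,
      PySem.Int.mod_eq_emod_of_pos (by positivity : (0:Int) < 14 ^ (n / 2)),
      PySem.Int.floordiv_eq_ediv_of_pos (by positivity : (0:Int) < 14 ^ (n / 2)),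
      ← digitsOf_split (n / 2) n p (by omega)]

theorem alt_eq_digits (a b : List Int) (keep : Int) :
    mul_low_alt a b keep = digitsOf ((val14 a * val14 b) % 14 ^ keep.toNat) keep.toNat := by
  unfold mul_low_alt
  by_cases hk : keep ≤ 0
  · rw [if_pos hk]
    have h0 : keep.toNat = 0 := by omega
    rw [h0]; rfl
  · rw [if_neg hk, pvDigits_eq, pvToInt_eq, pvToInt_eq,
      PySem.Int.mod_eq_emod_of_pos (by positivity : (0:Int) < 14 ^ keep.toNat)]

theorem row_inv (jmax : Nat) (res : List Int) (ai : Int) (b : List Int) (i K : Nat)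
    (hlen : res.length = K) (hn : pvNormal res) (hK : i + jmax ≤ K) (hb : jmax ≤ b.length) :
    (pvRow res ai b i jmax).1.length = K ∧ pvNormal (pvRow res ai b i jmax).1 ∧
    (pvRow res ai b i jmax).1.drop (i + jmax) = res.drop (i + jmax) ∧
    val14 (pvRow res ai b i jmax).1 + (pvRow res ai b i jmax).2 * 14 ^ (i + jmax)
      = val14 res + ai * val14 (b.take jmax) * 14 ^ i := by
  induction jmax with
  | zero => exact ⟨hlen, hn, rfl, by simp [pvRow, val14]⟩
  | succ j ih =>
    obtain ⟨L, N, Dr, V⟩ := ih (by omega) (by omega)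
    have hij : i + j < K := by omega
    have hijl : i + j < (pvRow res ai b i j).1.length := by omega
    have hstep : pvRow res ai b i (j + 1) =
        (let st := pvRow res ai b i j
         let c := st.2 + st.1.getD (i + j) 0 + ai * b.getD j 0
         (st.1.set (i + j) (PySem.Int.mod c 14), PySem.Int.floordiv c 14)) := by
      simp only [pvRow, List.range_succ, List.foldl_append, List.foldl_cons, List.foldl_nil]
    rw [hstep]
    simp only [PySem.Int.mod_eq_emod_of_pos (by norm_num : (0:Int) < 14),
      PySem.Int.floordiv_eq_ediv_of_pos (by norm_num : (0:Int) < 14)]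
    set st := pvRow res ai b i j with hst
    set c : Int := st.2 + st.1.getD (i + j) 0 + ai * b.getD j 0 with hc
    have hmod1 : 0 ≤ c % 14 := Int.emod_nonneg _ (by norm_num)
    have hmod2 : c % 14 < 14 := Int.emod_lt_of_pos _ (by norm_num)
    refine ⟨by simp [L], normal_set _ _ _ N ⟨hmod1, hmod2⟩, ?_, ?_⟩
    · have h1 : (st.1.set (i + j) (c % 14)).drop (i + (j + 1)) = st.1.drop (i + (j + 1)) :=
        List.drop_set_of_lt (by omega)
      have h2 : st.1.drop (i + (j + 1)) = res.drop (i + (j + 1)) := by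
        have hdd := congrArg (List.drop 1) Dr
        simp only [List.drop_drop] at hdd
        have e1 : i + (j + 1) = i + j + 1 := by omega
        rw [e1]; exact hdd
      rw [h1, h2]
    · rw [val14_set _ _ _ hijl]
      have hdm : 14 * (c / 14) + c % 14 = c := Int.mul_ediv_add_emod c 14
      rw [val14_take_succ b j hb]
      have e1 : (14:Int) ^ (i + (j + 1)) = 14 ^ (i + j) * 14 := pow_succ 14 (i + j)
      have e2 : (14:Int) ^ (i + j) = 14 ^ i * 14 ^ j := pow_add 14 i j
      linear_combination V + e1 * (c / 14) + (14:Int) ^ (i + j) * hdm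
        + (c % 14 - st.1.getD (i + j) 0 + c / 14 * 14) * e2

theorem while_inv (fuel : Nat) (res : List Int) (carry : Int) (pos K : Nat)
    (hfk : pos + fuel = K) (hlen : res.length = K) (hn : pvNormal res)
    (hc : fuel = 0 ∨ 0 ≤ carry) :
    (pvWhile fuel res carry pos).length = K ∧ pvNormal (pvWhile fuel res carry pos) ∧
    val14 (pvWhile fuel res carry pos) % 14 ^ K
      = (val14 res + carry * 14 ^ pos) % 14 ^ K := by
  induction fuel generalizing res carry pos with
  | zero =>
    refine ⟨hlen, hn, ?_⟩
    have : pos = K := by omega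
    subst this
    rw [mul_comm carry]
    exact (Int.add_mul_emod_self_left ..).symm
  | succ f ih =>
    have hcnn : 0 ≤ carry := hc.resolve_left (by omega)
    by_cases hpos : 0 < carry
    · have hposK : pos < K := by omega
      have hposl : pos < res.length := by omega
      have hg := normal_getD res pos hn
      set c : Int := carry + res.getD pos 0 with hcdef
      have hcnn2 : 0 ≤ c := by omega
      have hmod1 : 0 ≤ c % 14 := Int.emod_nonneg _ (by norm_num)
      have hmod2 : c % 14 < 14 := Int.emod_lt_of_pos _ (by norm_num)
      have hstep : pvWhile (f + 1) res carry pos =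
          pvWhile f (res.set pos (c % 14)) (c / 14) (pos + 1) := by
        simp only [pvWhile, if_pos hpos,
          PySem.Int.mod_eq_emod_of_pos (by norm_num : (0:Int) < 14),
          PySem.Int.floordiv_eq_ediv_of_pos (by norm_num : (0:Int) < 14)]
        rw [← hcdef]
      rw [hstep]
      obtain ⟨L, N, V⟩ := ih (res.set pos (c % 14)) (c / 14) (pos + 1)
        (by omega) (by simp [hlen]) (normal_set _ _ _ hn ⟨hmod1, hmod2⟩)
        (Or.inr (Int.ediv_nonneg hcnn2 (by norm_num)))
      refine ⟨L, N, ?_⟩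
      rw [V, val14_set _ _ _ hposl]
      congr 1
      have hdm : 14 * (c / 14) + c % 14 = c := Int.mul_ediv_add_emod c 14
      have e1 : (14:Int) ^ (pos + 1) = 14 ^ pos * 14 := pow_succ 14 pos
      linear_combination e1 * (c / 14) + (14:Int) ^ pos * hdm
    · have hc0 : carry = 0 := by omega
      have hstep : pvWhile (f + 1) res carry pos = res := by
        simp only [pvWhile, if_neg hpos]
      rw [hstep, hc0]
      refine ⟨hlen, hn, ?_⟩
      norm_num


theorem val14_replicate (K : Nat) : val14 (List.replicate K 0) = 0 := by
  induction K with
  | zero => rfl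
  | succ n ih => simp [List.replicate_succ, val14, ih]

theorem pvNormal_replicate (K : Nat) : pvNormal (List.replicate K 0) := by
  intro x hx
  rw [List.eq_of_mem_replicate hx]
  norm_num

-- ===== VERDICT (by name: the statement is the Claim_ definition above) =====
theorem mul_low_spec : Claim_unchanged_mul_low := by
  intro a b keep _ hD
  set K := keep.toNat with hK
  set vb := val14 b with hvb
  set F : List Int → Nat → List Int := fun res i =>
    let ai := a.getD i 0
    if ai = 0 then res
    else
      let jmax := min b.length (K - i)
      let st := pvRow res ai b i jmax
      pvWhile (K - (i + jmax)) st.1 st.2 (i + jmax) with hF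
  have hmain : ∀ n, n ≤ min a.length K →
      (((List.range n).foldl F (List.replicate K 0)).length = K ∧
       pvNormal ((List.range n).foldl F (List.replicate K 0)) ∧
       val14 ((List.range n).foldl F (List.replicate K 0))
         = (val14 (a.take n) * vb) % 14 ^ K) := by
    intro n
    induction n with
    | zero =>
      intro _
      refine ⟨by simp, pvNormal_replicate K, ?_⟩
      simp [val14_replicate, val14]
    | succ n ih =>
      intro hn
      obtain ⟨L, N, V⟩ := ih (by omega)
      set r := (List.range n).foldl F (List.replicate K 0) with hr
      have hfold : (List.range (n + 1)).foldl F (List.replicate K 0) = F r n := by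
        rw [List.range_succ, List.foldl_append, List.foldl_cons, List.foldl_nil]
      rw [hfold]
      have hna : n < a.length := by omega
      have hnK : n < K := by omega
      have htakes : val14 (a.take (n + 1)) = val14 (a.take n) + a.getD n 0 * 14 ^ n :=
        val14_take_succ a n hna
      by_cases hz : a.getD n 0 = 0
      · have hFr : F r n = r := by rw [hF]; simp only [if_pos hz]
        rw [hFr]
        refine ⟨L, N, ?_⟩
        rw [V, htakes, hz]; ring_nf
      · set ai := a.getD n 0 with hai
        set jmax := min b.length (K - n) with hjm
        have hjb : jmax ≤ b.length := min_le_left _ _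
        have hjK : n + jmax ≤ K := by omega
        obtain ⟨L2, N2, Dr2, V2⟩ := row_inv jmax r ai b n K L N hjK hjb
        set st := pvRow r ai b n jmax with hst
        have hFr : F r n = pvWhile (K - (n + jmax)) st.1 st.2 (n + jmax) := by
          rw [hF]; simp only [← hai, ← hjm, ← hst]; rw [if_neg hz]
        by_cases hcase : K ≤ n + b.length
        · have hnj : n + jmax = K := by omega
          have hres : F r n = st.1 := by rw [hFr, hnj, Nat.sub_self]; rfl
          rw [hres]
          refine ⟨L2, N2, ?_⟩
          have hb1 : 0 ≤ val14 st.1 := val14_nonneg _ N2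
          have hb2 : val14 st.1 < 14 ^ K := by have h := val14_lt _ N2; rwa [L2] at h
          rw [hnj] at V2
          calc val14 st.1 = val14 st.1 % 14 ^ K := (Int.emod_eq_of_lt hb1 hb2).symm
            _ = (val14 st.1 + 14 ^ K * st.2) % 14 ^ K := (Int.add_mul_emod_self_left ..).symm
            _ = (val14 r + ai * val14 (b.take jmax) * 14 ^ n) % 14 ^ K := by
                rw [show val14 st.1 + 14 ^ K * st.2 = val14 st.1 + st.2 * 14 ^ K from by ring, V2]
            _ = (val14 r + ai * vb * 14 ^ n) % 14 ^ K := by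
                have hsplit := val14_take_drop b jmax
                have he : val14 r + ai * vb * 14 ^ n
                    = (val14 r + ai * val14 (b.take jmax) * 14 ^ n)
                      + 14 ^ K * (ai * val14 (b.drop jmax)) := by
                  rw [hvb, hsplit, ← hnj, pow_add]; ring
                rw [he, Int.add_mul_emod_self_left]
            _ = (val14 (a.take n) * vb + ai * vb * 14 ^ n) % 14 ^ K := by
                rw [V, Int.emod_add_emod]
            _ = (val14 (a.take (n + 1)) * vb) % 14 ^ K := by rw [htakes]; ring_nf
        · have hjm2 : jmax = b.length := by omega
          have hnj : n + jmax < K := by omega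
          have htb : b.take jmax = b := by rw [hjm2]; exact List.take_length
          rw [htb] at V2
          have hsign : 0 ≤ ai * vb := by
            by_contra hneg
            rw [not_le] at hneg
            exact hD ⟨n, by omega, by rw [← hai, ← hvb]; exact hneg⟩
          have hcnn : 0 ≤ st.2 := by
            have hsr := val14_take_drop r (n + jmax)
            have hss := val14_take_drop st.1 (n + jmax)
            rw [Dr2] at hss
            have hltN : pvNormal (st.1.take (n + jmax)) :=
              fun x hx => N2 x (List.mem_of_mem_take hx)
            have hlt : val14 (st.1.take (n + jmax)) < 14 ^ (n + jmax) := by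
              have h := val14_lt _ hltN
              rwa [List.length_take, L2, min_eq_left (by omega)] at h
            have hge : 0 ≤ val14 (r.take (n + jmax)) :=
              val14_nonneg _ (fun x hx => N x (List.mem_of_mem_take hx))
            have hge2 : 0 ≤ val14 (st.1.take (n + jmax)) := val14_nonneg _ hltN
            have hnn : 0 ≤ ai * vb * 14 ^ n := mul_nonneg hsign (by positivity)
            have hpp : (0:Int) < 14 ^ (n + jmax) := by positivity
            nlinarith [V2, hsr, hss]
          obtain ⟨L3, N3, V3⟩ := while_inv (K - (n + jmax)) st.1 st.2 (n + jmax) K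
            (by omega) L2 N2 (Or.inr hcnn)
          rw [hFr]
          refine ⟨L3, N3, ?_⟩
          have hb1 : 0 ≤ val14 (pvWhile (K - (n + jmax)) st.1 st.2 (n + jmax)) :=
            val14_nonneg _ N3
          have hb2 : val14 (pvWhile (K - (n + jmax)) st.1 st.2 (n + jmax)) < 14 ^ K := by
            have h := val14_lt _ N3; rwa [L3] at h
          calc val14 (pvWhile (K - (n + jmax)) st.1 st.2 (n + jmax))
              = val14 (pvWhile (K - (n + jmax)) st.1 st.2 (n + jmax)) % 14 ^ K :=
                (Int.emod_eq_of_lt hb1 hb2).symm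
            _ = (val14 st.1 + st.2 * 14 ^ (n + jmax)) % 14 ^ K := V3
            _ = (val14 r + ai * vb * 14 ^ n) % 14 ^ K := by rw [V2]
            _ = (val14 (a.take n) * vb + ai * vb * 14 ^ n) % 14 ^ K := by
                rw [V, Int.emod_add_emod]
            _ = (val14 (a.take (n + 1)) * vb) % 14 ^ K := by rw [htakes]; ring_nf
  obtain ⟨L, N, V⟩ := hmain (min a.length K) le_rfl
  have hA : mul_low a b keep
      = (List.range (min a.length K)).foldl F (List.replicate K 0) := by
    rw [hF, hK]; rfl
  have hbridge : (val14 (a.take (min a.length K)) * vb) % 14 ^ K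
      = (val14 a * vb) % 14 ^ K := by
    rcases le_total a.length K with hle | hle
    · rw [min_eq_left hle, List.take_length]
    · have hm : min a.length K = K := min_eq_right hle
      have hsplit := val14_take_drop a (min a.length K)
      have he : val14 a * vb = val14 (a.take (min a.length K)) * vb
          + 14 ^ K * (val14 (a.drop (min a.length K)) * vb) := by
        rw [hsplit, hm]; ring
      rw [he, Int.add_mul_emod_self_left]
  rw [alt_eq_digits, hA, ← hK, ← hvb]
  exact digits_unique _ K _ N L
    (by rw [V, hbridge]; exact (Int.emod_emod_of_dvd _ dvd_rfl).symm)

theorem mul_low_changed : Claim_changed_mul_low := by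
  unfold Claim_changed_mul_low
  refine ⟨by decide, by decide, by decide, ?_, by decide⟩
  show mul_low_alt [-1] [1] 2 = [13, 13]
  rw [alt_eq_digits]
  decide
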